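-- pv_equiv track=rewrite | github.com/vpovarna/AdventOfCode | python/2024/day07/day07.py | generate_operations
-- ===== SOURCE A (Python) =====
-- from typing import List
--
-- def generate_operations(arr: List[int], current: str = "") -> List[str]:
--     if len(arr) == 1:
--         return [current + str(arr[0])]
--
--     results = []
--
--     first = arr[0]
--     rest = arr[1:]
--
--     for expression in generate_operations(rest, ""):
--         results.append(f"{current}{first} + {expression}")
--         results.append(f"{current}{first} * {expression}")
--
--     return results
-- ===== SOURCE B (Python) =====
-- from typing import List
--
-- def generate_operations(arr: List[int], current: str = "") -> List[str]:
--     head = str(arr[0])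
--     rest = arr[1:]
--     out = []
--     for i in range(2 ** len(rest)):
--         expr = head
--         bits = i
--         for x in rest:
--             expr += ' * ' if bits & 1 else ' + '
--             expr += str(x)
--             bits >>= 1
--         out.append(current + expr)
--     return out
-- ===== Notes on version B (the rewrite author's own statement) =====
-- stated objective: alternative
-- what changed: Replaces A's recursion over the tail (building each result from recursive sub-expressions) with a single iterative bitmask enumeration: for each i in range(2**(n-1)) the bits of i (LSB = leftmost) pick '+' or '*' at each position while the expression string is built left to right.
import Mathlib
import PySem

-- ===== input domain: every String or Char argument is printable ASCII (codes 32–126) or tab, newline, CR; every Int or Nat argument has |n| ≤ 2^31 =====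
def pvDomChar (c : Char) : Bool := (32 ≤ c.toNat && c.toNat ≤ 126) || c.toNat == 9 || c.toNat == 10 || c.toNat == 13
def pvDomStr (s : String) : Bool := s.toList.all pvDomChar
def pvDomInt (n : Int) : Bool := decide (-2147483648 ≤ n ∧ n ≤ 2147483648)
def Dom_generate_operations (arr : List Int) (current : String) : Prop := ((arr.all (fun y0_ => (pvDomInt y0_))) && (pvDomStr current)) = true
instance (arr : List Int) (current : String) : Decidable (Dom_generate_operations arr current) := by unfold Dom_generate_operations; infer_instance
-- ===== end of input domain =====

-- B replaces A's recursion with a single iterative bitmask enumeration (bit j of i = operator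
-- at position j, LSB leftmost); objective: alternative decomposition, same output order.

-- ===== PORT A =====
-- Literal transliteration of the recursive A. On the empty list the Python raises
-- IndexError (arr[0]); excluded by Pre_; the port returns [] there.
def generate_operations : List Int → String → List String
  | [], _ => []
  | [a], current => [current ++ PySem.Int.toStr a]
  | a :: b :: r, current =>
      (generate_operations (b :: r) "").foldl
        (fun results expression =>
          results ++ [current ++ PySem.Int.toStr a ++ " + " ++ expression,
                      current ++ PySem.Int.toStr a ++ " * " ++ expression]) []

-- ===== PORT B =====
-- inner loop of Source B: for x in rest: expr += op(bits); expr += str(x); bits >>= 1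
def altLoop : Nat → String → List Int → String
  | _, expr, [] => expr
  | bits, expr, x :: xs =>
      altLoop (bits >>> 1) (expr ++ (if bits &&& 1 == 1 then " * " else " + ") ++ PySem.Int.toStr x) xs

-- Transliteration of Source B. On the empty list the Python raises IndexError (arr[0]);
-- excluded by Pre_; the port returns [] there.
def generate_operations_alt (arr : List Int) (current : String) : List String :=
  match arr with
  | [] => []
  | a :: rest =>
      (List.range (2 ^ rest.length)).foldl
        (fun out i => out ++ [current ++ altLoop i (PySem.Int.toStr a) rest]) []

-- ===== PRECONDITION & SPEC =====
-- Both Pythons raise IndexError on the empty list (arr[0]), so it is excluded.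
def Pre_generate_operations (arr : List Int) (_current : String) : Prop := arr ≠ []
instance (arr : List Int) (_current : String) : Decidable (Pre_generate_operations arr _current) := by
  unfold Pre_generate_operations; infer_instance

def pvWitness_generate_operations : List Int × String := ([1, 2, 3], "")

def Spec_generate_operations (arr : List Int) (current : String) (out : List String) : Prop := out = generate_operations_alt arr current
instance (arr : List Int) (current : String) (out : List String) : Decidable (Spec_generate_operations arr current out) := by unfold Spec_generate_operations; infer_instance

-- ===== CLAIM (what is proved, stated in full; the proofs are below) =====
def Claim_equal_generate_operations : Prop := ∀ (arr : List Int) (current : String), Dom_generate_operations arr current → Pre_generate_operations arr current → Spec_generate_operations arr current (generate_operations arr current)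

-- ===== LEMMAS AND PROOFS =====

-- the part of the expression after the head, driven by the bits of i (LSB = leftmost operator)
def tailStr : Nat → List Int → String
  | _, [] => ""
  | bits, x :: xs =>
      (if bits % 2 == 1 then " * " else " + ") ++ PySem.Int.toStr x ++ tailStr (bits / 2) xs

theorem altLoop_eq (xs : List Int) : ∀ (bits : Nat) (e : String),
    altLoop bits e xs = e ++ tailStr bits xs := by
  induction xs with
  | nil => intro bits e; simp [altLoop, tailStr]
  | cons x xs ih =>
      intro bits e
      simp [altLoop, tailStr, ih, Nat.and_one_is_mod, Nat.shiftRight_one, String.append_assoc]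

theorem pvRangeTwoMul (n : Nat) :
    List.range (2 * n) = (List.range n).flatMap (fun k => [2 * k, 2 * k + 1]) := by
  induction n with
  | zero => rfl
  | succ n ih =>
      have h : 2 * (n + 1) = (2 * n + 1) + 1 := by ring
      rw [h, List.range_succ, List.range_succ, ih, List.range_succ]
      simp

theorem genA (r : List Int) : ∀ (a : Int) (cur : String),
    generate_operations (a :: r) cur
      = (List.range (2 ^ r.length)).map (fun i => cur ++ PySem.Int.toStr a ++ tailStr i r) := by
  induction r with
  | nil => intro a cur; simp [generate_operations, tailStr]
  | cons b r' ih =>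
      intro a cur
      have h2 : 2 ^ (b :: r').length = 2 * 2 ^ r'.length := by
        simp [List.length_cons, pow_succ, Nat.mul_comm]
      rw [show generate_operations (a :: b :: r') cur
            = (generate_operations (b :: r') "").foldl
                (fun results expression =>
                  results ++ [cur ++ PySem.Int.toStr a ++ " + " ++ expression,
                              cur ++ PySem.Int.toStr a ++ " * " ++ expression]) [] from rfl,
          ih, PySem.List.foldl_append_eq_flatMap, h2, pvRangeTwoMul]
      simp only [List.flatMap_map, List.map_flatMap, List.nil_append]
      refine List.flatMap_congr (fun k _ => ?_)
      have e0 : (2 * k) % 2 = 0 := by omega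
      have e1 : (2 * k + 1) % 2 = 1 := by omega
      have d0 : 2 * k / 2 = k := by omega
      have d1 : (2 * k + 1) / 2 = k := by omega
      simp [tailStr, e0, e1, d0, d1, String.append_assoc]

theorem genB (a : Int) (r : List Int) (cur : String) :
    generate_operations_alt (a :: r) cur
      = (List.range (2 ^ r.length)).map (fun i => cur ++ PySem.Int.toStr a ++ tailStr i r) := by
  rw [show generate_operations_alt (a :: r) cur
        = (List.range (2 ^ r.length)).foldl
            (fun out i => out ++ [cur ++ altLoop i (PySem.Int.toStr a) r]) [] from rfl,
      PySem.List.foldl_append_singleton_eq_map]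
  simp [altLoop_eq, String.append_assoc]

-- ===== VERDICT (by name: the statement is the Claim_ definition above) =====
theorem generate_operations_spec : Claim_equal_generate_operations := by
  intro arr current _ hpre
  unfold Spec_generate_operations
  match arr with
  | [] => exact absurd rfl hpre
  | a :: r => rw [genA, genB]
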